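-- pv_equiv track=rewrite | github.com/zxgsy520/Assemble_QC | scripts/stat_genome.py | stat_scaffold
-- ===== SOURCE A (Python) =====
-- def get_nx(lengths, x=0.5):
--
--     addlen = 0
--     total = sum(lengths)
--     xl = 0
--
--     for i in sorted(lengths, reverse=True):
--         addlen += i
--         if addlen >= total*x:
--             xl = i
--             break
--
--     return xl
--
-- def stat_scaffold(data_scaf, scaflens):
--
--     r = {"N50": [0, 0, 0, 0],
--         "N60": [0, 0, 0, 0],
--         "N70": [0, 0, 0, 0],
--         "N80": [0, 0, 0, 0],
--         "N90": [0, 0, 0, 0],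
--         "Longest": [0, 0, 0, 0],
--         "Total": [0, 0, 0, 0],
--         "Length>=1kb": [0, 0, 0, 0],
--         "Length>=2kb": [0, 0, 0, 0],
--         "Length>=5kb": [0, 0, 0, 0]
--     }
--     total = sum(scaflens)
--     maxlen = max(scaflens)
--     r["N50"][0] = get_nx(scaflens, x=0.5)
--     r["N60"][0] = get_nx(scaflens, x=0.6)
--     r["N70"][0] = get_nx(scaflens, x=0.7)
--     r["N80"][0] = get_nx(scaflens, x=0.8)
--     r["N90"][0] = get_nx(scaflens, x=0.9)
--     r["Total"][0] = total
--     r["Total"][1] = len(scaflens)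
--
--     for line in sorted(data_scaf.items(), key=lambda x:x[1], reverse=True):
--         scaflen, gap = line[1]
--         gapnum = len(gap)
--         gaplen = sum(gap)
--
--         r["Total"][3] += gapnum
--         r["Total"][2] += gaplen
--
--         if scaflen >= 1000:
--             r["Length>=1kb"][0] += scaflen
--             r["Length>=1kb"][1] += 1
--             r["Length>=1kb"][3] += gapnum
--             r["Length>=1kb"][2] += gaplen
--         if scaflen >= 2000:
--             r["Length>=2kb"][0] += scaflen
--             r["Length>=2kb"][1] += 1
--             r["Length>=2kb"][3] += gapnum
--             r["Length>=2kb"][2] += gaplen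
--         if scaflen >= 5000:
--             r["Length>=5kb"][0] += scaflen
--             r["Length>=5kb"][1] += 1
--             r["Length>=5kb"][3] += gapnum
--             r["Length>=5kb"][2] += gaplen
--         if scaflen >= maxlen:
--             r["Longest"][0] = scaflen
--             r["Longest"][1] += 1
--             r["Longest"][2] = gaplen
--         else:
--             r["Longest"][3] += gapnum
--
--         if scaflen >= r["N50"][0]:
--             r["N50"][1] += 1
--             r["N50"][3] += gapnum
--             r["N50"][2] = gaplen
--         if scaflen >= r["N60"][0]:
--             r["N60"][1] += 1
--             r["N60"][3] += gapnum
--             r["N60"][2] = gaplen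
--         if scaflen >= r["N70"][0]:
--             r["N70"][1] += 1
--             r["N70"][3] += gapnum
--             r["N70"][2] = gaplen
--         if scaflen >= r["N80"][0]:
--             r["N80"][1] += 1
--             r["N80"][3] += gapnum
--             r["N80"][2] = gaplen
--         if scaflen >= r["N90"][0]:
--             r["N90"][1] += 1
--             r["N90"][3] += gapnum
--             r["N90"][2] = gaplen
--
--     return r
-- ===== SOURCE B (Python) =====
-- def stat_scaffold(data_scaf, scaflens):
--     total = sum(scaflens)
--     maxlen = max(scaflens)
--
--     # one descending sort, one pass for all five Nx thresholds
--     desc = sorted(scaflens, reverse=True)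
--     n50 = n60 = n70 = n80 = n90 = (0, False)
--     acc = 0
--
--     def upd(p, length, hit):
--         return (length, True) if (not p[1]) and hit else p
--
--     for length in desc:
--         acc += length
--         n50 = upd(n50, length, acc >= total * 0.5)
--         n60 = upd(n60, length, acc >= total * 0.6)
--         n70 = upd(n70, length, acc >= total * 0.7)
--         n80 = upd(n80, length, acc >= total * 0.8)
--         n90 = upd(n90, length, acc >= total * 0.9)
--
--     items = sorted(data_scaf.items(), key=lambda t: t[1], reverse=True)
--     triples = [(s, sum(g), len(g)) for (_name, (s, g)) in items]
--
--     def nx_row(n):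
--         q = [t for t in triples if t[0] >= n]
--         return [n, len(q), q[-1][1] if q else 0, sum(t[2] for t in q)]
--
--     def size_row(th):
--         q = [t for t in triples if t[0] >= th]
--         return [sum(t[0] for t in q), len(q), sum(t[1] for t in q), sum(t[2] for t in q)]
--
--     lq = [t for t in triples if t[0] >= maxlen]
--     longest = [lq[-1][0] if lq else 0, len(lq), lq[-1][1] if lq else 0,
--                sum(t[2] for t in triples if t[0] < maxlen)]
--
--     return {"N50": nx_row(n50[0]), "N60": nx_row(n60[0]), "N70": nx_row(n70[0]),
--             "N80": nx_row(n80[0]), "N90": nx_row(n90[0]), "Longest": longest,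
--             "Total": [total, len(scaflens), sum(t[1] for t in triples), sum(t[2] for t in triples)],
--             "Length>=1kb": size_row(1000), "Length>=2kb": size_row(2000),
--             "Length>=5kb": size_row(5000)}
-- ===== Notes on version B (the rewrite author's own statement) =====
-- stated objective: simpler
-- what changed: B replaces the five separate get_nx calls (each re-sorting scaflens and rescanning) by one descending sort plus a single accumulating pass that records all five Nx values, and replaces A's imperative loop mutating ten dict rows in lockstep by independent per-row filter/sum/last-element aggregations over the sorted items.
import Mathlib
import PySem

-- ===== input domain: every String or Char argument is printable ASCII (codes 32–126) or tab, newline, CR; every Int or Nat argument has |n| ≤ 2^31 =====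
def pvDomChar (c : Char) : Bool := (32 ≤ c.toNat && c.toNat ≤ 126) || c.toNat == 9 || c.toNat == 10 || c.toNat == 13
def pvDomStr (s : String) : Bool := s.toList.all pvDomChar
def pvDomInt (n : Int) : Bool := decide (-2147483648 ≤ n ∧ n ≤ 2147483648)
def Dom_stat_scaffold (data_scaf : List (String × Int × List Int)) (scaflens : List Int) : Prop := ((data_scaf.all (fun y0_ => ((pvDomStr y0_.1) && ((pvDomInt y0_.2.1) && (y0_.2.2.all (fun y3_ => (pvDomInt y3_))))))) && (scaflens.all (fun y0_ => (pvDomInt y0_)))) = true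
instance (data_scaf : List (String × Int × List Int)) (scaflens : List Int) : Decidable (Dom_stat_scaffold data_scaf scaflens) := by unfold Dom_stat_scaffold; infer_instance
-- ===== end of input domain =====

-- B replaces the five re-sorting get_nx scans by one sort plus a single accumulating pass
-- recording all five Nx values, and replaces A's imperative loop mutating ten rows by
-- independent per-row filter/sum aggregations (objective: simpler, one sort instead of six).


-- ===== SHARED FLOAT HELPERS =====
-- Both Pythons compare `addlen >= total*x` with x a float literal; pvFge models that
-- expression exactly: int→float conversion and the float product are round-to-nearest-even
-- on dyadic rationals (53-bit mantissa), the comparison is then exact.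
def pvRnd (m e : Int) : Int × Int :=
  let b := PySem.Int.bitLength m
  if b ≤ 53 then (m, e)
  else
    let s : Nat := b - 53
    let d : Int := 2 ^ s
    let q := PySem.Int.floordiv m d
    let r := m - q * d
    let q2 := if 2 * r < d then q else if d < 2 * r then q + 1
              else if PySem.Int.mod q 2 = 0 then q else q + 1
    (q2, e + s)

-- `addlen >= total * x` where the float x = cm · 2^ce exactly
def pvFge (addlen total cm ce : Int) : Bool :=
  let t := pvRnd total 0
  let p := pvRnd (t.1 * cm) (t.2 + ce)
  if 0 ≤ p.2 then decide (p.1 * 2 ^ p.2.toNat ≤ addlen)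
  else decide (p.1 ≤ addlen * 2 ^ (-p.2).toNat)

-- the exact dyadic values of the float literals 0.5, 0.6, 0.7, 0.8, 0.9
def pvC50 : Int × Int := (1, -1)
def pvC60 : Int × Int := (5404319552844595, -53)
def pvC70 : Int × Int := (3152519739159347, -52)
def pvC80 : Int × Int := (3602879701896397, -52)
def pvC90 : Int × Int := (8106479329266893, -53)

-- ===== PORT A =====
-- the `for i in sorted(lengths, reverse=True): … break` loop of get_nx
def getnxLoop (c : Int × Int) (total acc : Int) : List Int → Int
  | [] => 0
  | i :: rest =>
    let acc' := acc + i
    if pvFge acc' total c.1 c.2 then i else getnxLoop c total acc' rest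

def get_nx (lengths : List Int) (c : Int × Int) : Int :=
  getnxLoop c lengths.sum 0 (PySem.List.sorted lengths (fun v => v) true)

structure PvRow where
  a : Int
  b : Int
  c : Int
  d : Int
deriving Repr, DecidableEq

structure PvSt where
  n50 : PvRow
  n60 : PvRow
  n70 : PvRow
  n80 : PvRow
  n90 : PvRow
  lng : PvRow
  tot : PvRow
  k1 : PvRow
  k2 : PvRow
  k5 : PvRow
deriving Repr, DecidableEq

-- one iteration of A's big loop over sorted(data_scaf.items()); each r[...] row is
-- updated independently, in the order of the Python if-blocks
def pvStepA (maxlen : Int) (st : PvSt) (line : String × Int × List Int) : PvSt :=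
  let scaflen := line.2.1
  let gap := line.2.2
  let gapnum : Int := gap.length
  let gaplen : Int := gap.sum
  { tot := { st.tot with c := st.tot.c + gaplen, d := st.tot.d + gapnum }
    k1 := if 1000 ≤ scaflen then
        ⟨st.k1.a + scaflen, st.k1.b + 1, st.k1.c + gaplen, st.k1.d + gapnum⟩ else st.k1
    k2 := if 2000 ≤ scaflen then
        ⟨st.k2.a + scaflen, st.k2.b + 1, st.k2.c + gaplen, st.k2.d + gapnum⟩ else st.k2
    k5 := if 5000 ≤ scaflen then
        ⟨st.k5.a + scaflen, st.k5.b + 1, st.k5.c + gaplen, st.k5.d + gapnum⟩ else st.k5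
    lng := if maxlen ≤ scaflen then ⟨scaflen, st.lng.b + 1, gaplen, st.lng.d⟩
        else { st.lng with d := st.lng.d + gapnum }
    n50 := if st.n50.a ≤ scaflen then ⟨st.n50.a, st.n50.b + 1, gaplen, st.n50.d + gapnum⟩ else st.n50
    n60 := if st.n60.a ≤ scaflen then ⟨st.n60.a, st.n60.b + 1, gaplen, st.n60.d + gapnum⟩ else st.n60
    n70 := if st.n70.a ≤ scaflen then ⟨st.n70.a, st.n70.b + 1, gaplen, st.n70.d + gapnum⟩ else st.n70
    n80 := if st.n80.a ≤ scaflen then ⟨st.n80.a, st.n80.b + 1, gaplen, st.n80.d + gapnum⟩ else st.n80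
    n90 := if st.n90.a ≤ scaflen then ⟨st.n90.a, st.n90.b + 1, gaplen, st.n90.d + gapnum⟩ else st.n90 }

def pvOut (st : PvSt) : List (String × List Int) :=
  [("N50", [st.n50.a, st.n50.b, st.n50.c, st.n50.d]),
   ("N60", [st.n60.a, st.n60.b, st.n60.c, st.n60.d]),
   ("N70", [st.n70.a, st.n70.b, st.n70.c, st.n70.d]),
   ("N80", [st.n80.a, st.n80.b, st.n80.c, st.n80.d]),
   ("N90", [st.n90.a, st.n90.b, st.n90.c, st.n90.d]),
   ("Longest", [st.lng.a, st.lng.b, st.lng.c, st.lng.d]),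
   ("Total", [st.tot.a, st.tot.b, st.tot.c, st.tot.d]),
   ("Length>=1kb", [st.k1.a, st.k1.b, st.k1.c, st.k1.d]),
   ("Length>=2kb", [st.k2.a, st.k2.b, st.k2.c, st.k2.d]),
   ("Length>=5kb", [st.k5.a, st.k5.b, st.k5.c, st.k5.d])]

def stat_scaffold (data_scaf : List (String × Int × List Int)) (scaflens : List Int) : List (String × List Int) :=
  let total := scaflens.sum
  match PySem.List.max? scaflens (fun v => v) with
  | none => []   -- max([]) raises ValueError in Python; excluded by Pre_
  | some maxlen =>
    let init : PvSt :=
      { n50 := ⟨get_nx scaflens pvC50, 0, 0, 0⟩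
        n60 := ⟨get_nx scaflens pvC60, 0, 0, 0⟩
        n70 := ⟨get_nx scaflens pvC70, 0, 0, 0⟩
        n80 := ⟨get_nx scaflens pvC80, 0, 0, 0⟩
        n90 := ⟨get_nx scaflens pvC90, 0, 0, 0⟩
        lng := ⟨0, 0, 0, 0⟩
        tot := ⟨total, (scaflens.length : Int), 0, 0⟩
        k1 := ⟨0, 0, 0, 0⟩, k2 := ⟨0, 0, 0, 0⟩, k5 := ⟨0, 0, 0, 0⟩ }
    let items := PySem.List.sorted2 data_scaf (fun t => t.2.1) (fun t => t.2.2) true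
    pvOut (items.foldl (pvStepA maxlen) init)

-- ===== PORT B =====
def pvUpd (p : Int × Bool) (len : Int) (hit : Bool) : Int × Bool :=
  if !p.2 && hit then (len, true) else p

-- the single accumulating pass over the descending lengths
def pvNxLoop (total acc : Int) (s5 s6 s7 s8 s9 : Int × Bool) :
    List Int → (Int × Bool) × (Int × Bool) × (Int × Bool) × (Int × Bool) × (Int × Bool)
  | [] => (s5, s6, s7, s8, s9)
  | len :: rest =>
    let acc' := acc + len
    pvNxLoop total acc'
      (pvUpd s5 len (pvFge acc' total pvC50.1 pvC50.2))
      (pvUpd s6 len (pvFge acc' total pvC60.1 pvC60.2))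
      (pvUpd s7 len (pvFge acc' total pvC70.1 pvC70.2))
      (pvUpd s8 len (pvFge acc' total pvC80.1 pvC80.2))
      (pvUpd s9 len (pvFge acc' total pvC90.1 pvC90.2)) rest

def pvTrip (it : String × Int × List Int) : Int × Int × Int :=
  (it.2.1, it.2.2.sum, (it.2.2.length : Int))

def pvNxRow (tr : List (Int × Int × Int)) (n : Int) : List Int :=
  let q := tr.filter (fun t => n ≤ t.1)
  [n, (q.length : Int), (match q.getLast? with | some t => t.2.1 | none => 0),
   (q.map (fun t => t.2.2)).sum]

def pvSizeRow (tr : List (Int × Int × Int)) (th : Int) : List Int :=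
  let q := tr.filter (fun t => th ≤ t.1)
  [(q.map (fun t => t.1)).sum, (q.length : Int), (q.map (fun t => t.2.1)).sum,
   (q.map (fun t => t.2.2)).sum]

def stat_scaffold_alt (data_scaf : List (String × Int × List Int)) (scaflens : List Int) : List (String × List Int) :=
  let total := scaflens.sum
  match PySem.List.max? scaflens (fun v => v) with
  | none => []   -- max([]) raises ValueError in Python; excluded by Pre_
  | some maxlen =>
    let desc := PySem.List.sorted scaflens (fun v => v) true
    let r := pvNxLoop total 0 (0, false) (0, false) (0, false) (0, false) (0, false) desc
    let items := PySem.List.sorted2 data_scaf (fun t => t.2.1) (fun t => t.2.2) true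
    let tr := items.map pvTrip
    let lq := tr.filter (fun t => maxlen ≤ t.1)
    [("N50", pvNxRow tr r.1.1), ("N60", pvNxRow tr r.2.1.1), ("N70", pvNxRow tr r.2.2.1.1),
     ("N80", pvNxRow tr r.2.2.2.1.1), ("N90", pvNxRow tr r.2.2.2.2.1),
     ("Longest", [(match lq.getLast? with | some t => t.1 | none => 0), (lq.length : Int),
                  (match lq.getLast? with | some t => t.2.1 | none => 0),
                  ((tr.filter (fun t => t.1 < maxlen)).map (fun t => t.2.2)).sum]),
     ("Total", [total, (scaflens.length : Int), (tr.map (fun t => t.2.1)).sum,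
                (tr.map (fun t => t.2.2)).sum]),
     ("Length>=1kb", pvSizeRow tr 1000), ("Length>=2kb", pvSizeRow tr 2000),
     ("Length>=5kb", pvSizeRow tr 5000)]

-- ===== PRECONDITION & SPEC =====
-- Pre_ excludes the empty scaflens (A raises ValueError at max(scaflens)) and association
-- lists with duplicate keys, on which the dict parameter data_scaf cannot arise (a Python
-- dict dedups at construction, so the list model is unfaithful there).
def Pre_stat_scaffold (data_scaf : List (String × Int × List Int)) (scaflens : List Int) : Prop :=
  scaflens ≠ [] ∧ (data_scaf.map Prod.fst).Nodup
instance (data_scaf : List (String × Int × List Int)) (scaflens : List Int) : Decidable (Pre_stat_scaffold data_scaf scaflens) := by unfold Pre_stat_scaffold; infer_instance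

def pvWitness_stat_scaffold : (List (String × Int × List Int)) × List Int :=
  ([("s1", 1200, [10, 20]), ("s2", 800, [5])], [1200, 800])

def Spec_stat_scaffold (data_scaf : List (String × Int × List Int)) (scaflens : List Int) (out : List (String × List Int)) : Prop := out = stat_scaffold_alt data_scaf scaflens
instance (data_scaf : List (String × Int × List Int)) (scaflens : List Int) (out : List (String × List Int)) : Decidable (Spec_stat_scaffold data_scaf scaflens out) := by unfold Spec_stat_scaffold; infer_instance

-- ===== CLAIM (what is proved, stated in full; the proofs are below) =====
def Claim_equal_stat_scaffold : Prop := ∀ (data_scaf : List (String × Int × List Int)) (scaflens : List Int), Dom_stat_scaffold data_scaf scaflens → Pre_stat_scaffold data_scaf scaflens → Spec_stat_scaffold data_scaf scaflens (stat_scaffold data_scaf scaflens)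

-- ===== LEMMAS AND PROOFS =====

-- last qualifying element's gap length / scaffold length (fallback c)
def pvLastGL (n : Int) (tr : List (Int × Int × Int)) (c : Int) : Int :=
  match (tr.filter (fun t => n ≤ t.1)).getLast? with
  | some t => t.2.1
  | none => c

def pvLastS (n : Int) (tr : List (Int × Int × Int)) (c : Int) : Int :=
  match (tr.filter (fun t => n ≤ t.1)).getLast? with
  | some t => t.1
  | none => c

lemma pv_getLast?_cons {α : Type} (a : α) (l : List α) :
    (a :: l).getLast? = some ((l.getLast?).getD a) := by
  cases hl : l.getLast? <;> simp [List.getLast?_cons, hl]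

lemma pvLastGL_cons (n : Int) (y : Int × Int × Int) (tr : List (Int × Int × Int)) (c : Int) :
    pvLastGL n (y :: tr) c = pvLastGL n tr (if n ≤ y.1 then y.2.1 else c) := by
  unfold pvLastGL
  rw [List.filter_cons]
  by_cases h : n ≤ y.1
  · simp only [h, decide_true, if_true, pv_getLast?_cons]
    cases hl : (tr.filter (fun t => n ≤ t.1)).getLast? <;> simp_all
  · simp [h]

lemma pvLastS_cons (n : Int) (y : Int × Int × Int) (tr : List (Int × Int × Int)) (c : Int) :
    pvLastS n (y :: tr) c = pvLastS n tr (if n ≤ y.1 then y.1 else c) := by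
  unfold pvLastS
  rw [List.filter_cons]
  by_cases h : n ≤ y.1
  · simp only [h, decide_true, if_true, pv_getLast?_cons]
    cases hl : (tr.filter (fun t => n ≤ t.1)).getLast? <;> simp_all
  · simp [h]

-- single-pass Nx search vs the five get_nx scans
lemma pvUpd_if (p : Int × Bool) (len : Int) (h : Bool) (z : Int) :
    (if (pvUpd p len h).2 = true then (pvUpd p len h).1 else z)
      = if p.2 = true then p.1 else if h = true then len else z := by
  rcases p with ⟨v, f⟩
  cases f <;> cases h <;> simp [pvUpd]

lemma pvUpd_inv (p : Int × Bool) (len : Int) (h : Bool) (hp : p.2 = false → p.1 = 0) :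
    (pvUpd p len h).2 = false → (pvUpd p len h).1 = 0 := by
  rcases p with ⟨v, f⟩
  cases f <;> cases h <;> simp_all [pvUpd]

lemma pvNxLoop_eval : ∀ (l : List Int) (total acc : Int) (s5 s6 s7 s8 s9 : Int × Bool),
    (s5.2 = false → s5.1 = 0) → (s6.2 = false → s6.1 = 0) → (s7.2 = false → s7.1 = 0) →
    (s8.2 = false → s8.1 = 0) → (s9.2 = false → s9.1 = 0) →
    (pvNxLoop total acc s5 s6 s7 s8 s9 l).1.1
        = (if s5.2 = true then s5.1 else getnxLoop pvC50 total acc l) ∧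
    (pvNxLoop total acc s5 s6 s7 s8 s9 l).2.1.1
        = (if s6.2 = true then s6.1 else getnxLoop pvC60 total acc l) ∧
    (pvNxLoop total acc s5 s6 s7 s8 s9 l).2.2.1.1
        = (if s7.2 = true then s7.1 else getnxLoop pvC70 total acc l) ∧
    (pvNxLoop total acc s5 s6 s7 s8 s9 l).2.2.2.1.1
        = (if s8.2 = true then s8.1 else getnxLoop pvC80 total acc l) ∧
    (pvNxLoop total acc s5 s6 s7 s8 s9 l).2.2.2.2.1
        = (if s9.2 = true then s9.1 else getnxLoop pvC90 total acc l)
  | [], total, acc, s5, s6, s7, s8, s9, h5, h6, h7, h8, h9 => by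
    simp only [pvNxLoop, getnxLoop]
    refine ⟨?_, ?_, ?_, ?_, ?_⟩ <;> (rcases s5 with ⟨v, f⟩; cases f <;> simp_all)
  | len :: rest, total, acc, s5, s6, s7, s8, s9, h5, h6, h7, h8, h9 => by
    obtain ⟨i5, i6, i7, i8, i9⟩ :=
      pvNxLoop_eval rest total (acc + len)
        (pvUpd s5 len (pvFge (acc + len) total pvC50.1 pvC50.2))
        (pvUpd s6 len (pvFge (acc + len) total pvC60.1 pvC60.2))
        (pvUpd s7 len (pvFge (acc + len) total pvC70.1 pvC70.2))
        (pvUpd s8 len (pvFge (acc + len) total pvC80.1 pvC80.2))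
        (pvUpd s9 len (pvFge (acc + len) total pvC90.1 pvC90.2))
        (pvUpd_inv _ _ _ h5) (pvUpd_inv _ _ _ h6) (pvUpd_inv _ _ _ h7)
        (pvUpd_inv _ _ _ h8) (pvUpd_inv _ _ _ h9)
    simp only [pvNxLoop, getnxLoop]
    exact ⟨by rw [i5, pvUpd_if], by rw [i6, pvUpd_if], by rw [i7, pvUpd_if],
           by rw [i8, pvUpd_if], by rw [i9, pvUpd_if]⟩

-- the ten per-row characterisations of A's fold
lemma foldA_n50 (m : Int) : ∀ (l : List (String × Int × List Int)) (st : PvSt),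
    (l.foldl (pvStepA m) st).n50 =
      ⟨st.n50.a,
       st.n50.b + (((l.map pvTrip).filter (fun t => st.n50.a ≤ t.1)).length : Int),
       pvLastGL st.n50.a (l.map pvTrip) st.n50.c,
       st.n50.d + (((l.map pvTrip).filter (fun t => st.n50.a ≤ t.1)).map (fun t => t.2.2)).sum⟩
  | [], st => by simp [pvLastGL]
  | x :: l, st => by
    rw [List.foldl_cons, foldA_n50 m l]
    simp only [pvStepA, List.map_cons, List.filter_cons, pvLastGL_cons, pvTrip]
    by_cases h : st.n50.a ≤ x.2.1 <;> (simp [h, PvRow.mk.injEq]; try omega)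


lemma foldA_n60 (m : Int) : ∀ (l : List (String × Int × List Int)) (st : PvSt),
    (l.foldl (pvStepA m) st).n60 =
      ⟨st.n60.a,
       st.n60.b + (((l.map pvTrip).filter (fun t => st.n60.a ≤ t.1)).length : Int),
       pvLastGL st.n60.a (l.map pvTrip) st.n60.c,
       st.n60.d + (((l.map pvTrip).filter (fun t => st.n60.a ≤ t.1)).map (fun t => t.2.2)).sum⟩
  | [], st => by simp [pvLastGL]
  | x :: l, st => by
    rw [List.foldl_cons, foldA_n60 m l]
    simp only [pvStepA, List.map_cons, List.filter_cons, pvLastGL_cons, pvTrip]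
    by_cases h : st.n60.a ≤ x.2.1 <;> (simp [h, PvRow.mk.injEq]; try omega)

lemma foldA_n70 (m : Int) : ∀ (l : List (String × Int × List Int)) (st : PvSt),
    (l.foldl (pvStepA m) st).n70 =
      ⟨st.n70.a,
       st.n70.b + (((l.map pvTrip).filter (fun t => st.n70.a ≤ t.1)).length : Int),
       pvLastGL st.n70.a (l.map pvTrip) st.n70.c,
       st.n70.d + (((l.map pvTrip).filter (fun t => st.n70.a ≤ t.1)).map (fun t => t.2.2)).sum⟩
  | [], st => by simp [pvLastGL]
  | x :: l, st => by
    rw [List.foldl_cons, foldA_n70 m l]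
    simp only [pvStepA, List.map_cons, List.filter_cons, pvLastGL_cons, pvTrip]
    by_cases h : st.n70.a ≤ x.2.1 <;> (simp [h, PvRow.mk.injEq]; try omega)

lemma foldA_n80 (m : Int) : ∀ (l : List (String × Int × List Int)) (st : PvSt),
    (l.foldl (pvStepA m) st).n80 =
      ⟨st.n80.a,
       st.n80.b + (((l.map pvTrip).filter (fun t => st.n80.a ≤ t.1)).length : Int),
       pvLastGL st.n80.a (l.map pvTrip) st.n80.c,
       st.n80.d + (((l.map pvTrip).filter (fun t => st.n80.a ≤ t.1)).map (fun t => t.2.2)).sum⟩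
  | [], st => by simp [pvLastGL]
  | x :: l, st => by
    rw [List.foldl_cons, foldA_n80 m l]
    simp only [pvStepA, List.map_cons, List.filter_cons, pvLastGL_cons, pvTrip]
    by_cases h : st.n80.a ≤ x.2.1 <;> (simp [h, PvRow.mk.injEq]; try omega)

lemma foldA_n90 (m : Int) : ∀ (l : List (String × Int × List Int)) (st : PvSt),
    (l.foldl (pvStepA m) st).n90 =
      ⟨st.n90.a,
       st.n90.b + (((l.map pvTrip).filter (fun t => st.n90.a ≤ t.1)).length : Int),
       pvLastGL st.n90.a (l.map pvTrip) st.n90.c,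
       st.n90.d + (((l.map pvTrip).filter (fun t => st.n90.a ≤ t.1)).map (fun t => t.2.2)).sum⟩
  | [], st => by simp [pvLastGL]
  | x :: l, st => by
    rw [List.foldl_cons, foldA_n90 m l]
    simp only [pvStepA, List.map_cons, List.filter_cons, pvLastGL_cons, pvTrip]
    by_cases h : st.n90.a ≤ x.2.1 <;> (simp [h, PvRow.mk.injEq]; try omega)

lemma foldA_tot (m : Int) : ∀ (l : List (String × Int × List Int)) (st : PvSt),
    (l.foldl (pvStepA m) st).tot =
      ⟨st.tot.a, st.tot.b,
       st.tot.c + ((l.map pvTrip).map (fun t => t.2.1)).sum,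
       st.tot.d + ((l.map pvTrip).map (fun t => t.2.2)).sum⟩
  | [], st => by simp
  | x :: l, st => by
    rw [List.foldl_cons, foldA_tot m l]
    simp only [pvStepA, List.map_cons, List.sum_cons, pvTrip]
    simp [PvRow.mk.injEq]
    omega


lemma foldA_k1 (m : Int) : ∀ (l : List (String × Int × List Int)) (st : PvSt),
    (l.foldl (pvStepA m) st).k1 =
      ⟨st.k1.a + (((l.map pvTrip).filter (fun t => (1000 : Int) ≤ t.1)).map (fun t => t.1)).sum,
       st.k1.b + (((l.map pvTrip).filter (fun t => (1000 : Int) ≤ t.1)).length : Int),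
       st.k1.c + (((l.map pvTrip).filter (fun t => (1000 : Int) ≤ t.1)).map (fun t => t.2.1)).sum,
       st.k1.d + (((l.map pvTrip).filter (fun t => (1000 : Int) ≤ t.1)).map (fun t => t.2.2)).sum⟩
  | [], st => by simp
  | x :: l, st => by
    rw [List.foldl_cons, foldA_k1 m l]
    simp only [pvStepA, List.map_cons, List.filter_cons, pvTrip]
    by_cases h : (1000 : Int) ≤ x.2.1 <;> (simp [h, PvRow.mk.injEq]; try omega)

lemma foldA_k2 (m : Int) : ∀ (l : List (String × Int × List Int)) (st : PvSt),
    (l.foldl (pvStepA m) st).k2 =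
      ⟨st.k2.a + (((l.map pvTrip).filter (fun t => (2000 : Int) ≤ t.1)).map (fun t => t.1)).sum,
       st.k2.b + (((l.map pvTrip).filter (fun t => (2000 : Int) ≤ t.1)).length : Int),
       st.k2.c + (((l.map pvTrip).filter (fun t => (2000 : Int) ≤ t.1)).map (fun t => t.2.1)).sum,
       st.k2.d + (((l.map pvTrip).filter (fun t => (2000 : Int) ≤ t.1)).map (fun t => t.2.2)).sum⟩
  | [], st => by simp
  | x :: l, st => by
    rw [List.foldl_cons, foldA_k2 m l]
    simp only [pvStepA, List.map_cons, List.filter_cons, pvTrip]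
    by_cases h : (2000 : Int) ≤ x.2.1 <;> (simp [h, PvRow.mk.injEq]; try omega)

lemma foldA_k5 (m : Int) : ∀ (l : List (String × Int × List Int)) (st : PvSt),
    (l.foldl (pvStepA m) st).k5 =
      ⟨st.k5.a + (((l.map pvTrip).filter (fun t => (5000 : Int) ≤ t.1)).map (fun t => t.1)).sum,
       st.k5.b + (((l.map pvTrip).filter (fun t => (5000 : Int) ≤ t.1)).length : Int),
       st.k5.c + (((l.map pvTrip).filter (fun t => (5000 : Int) ≤ t.1)).map (fun t => t.2.1)).sum,
       st.k5.d + (((l.map pvTrip).filter (fun t => (5000 : Int) ≤ t.1)).map (fun t => t.2.2)).sum⟩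
  | [], st => by simp
  | x :: l, st => by
    rw [List.foldl_cons, foldA_k5 m l]
    simp only [pvStepA, List.map_cons, List.filter_cons, pvTrip]
    by_cases h : (5000 : Int) ≤ x.2.1 <;> (simp [h, PvRow.mk.injEq]; try omega)

lemma foldA_lng (m : Int) : ∀ (l : List (String × Int × List Int)) (st : PvSt),
    (l.foldl (pvStepA m) st).lng =
      ⟨pvLastS m (l.map pvTrip) st.lng.a,
       st.lng.b + (((l.map pvTrip).filter (fun t => m ≤ t.1)).length : Int),
       pvLastGL m (l.map pvTrip) st.lng.c,
       st.lng.d + (((l.map pvTrip).filter (fun t => t.1 < m)).map (fun t => t.2.2)).sum⟩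
  | [], st => by simp [pvLastGL, pvLastS]
  | x :: l, st => by
    rw [List.foldl_cons, foldA_lng m l]
    simp only [pvStepA, List.map_cons, List.filter_cons, pvLastGL_cons, pvLastS_cons, pvTrip]
    by_cases h : m ≤ x.2.1
    · have h' : ¬ (x.2.1 < m) := by omega
      simp [h, h', PvRow.mk.injEq]; omega
    · have h' : x.2.1 < m := by omega
      simp [h, h', PvRow.mk.injEq]; omega

-- ===== VERDICT (by name: the statement is the Claim_ definition above) =====
theorem stat_scaffold_spec : Claim_equal_stat_scaffold := by
  intro data_scaf scaflens _hdom hpre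
  obtain ⟨hne, _hnodup⟩ := hpre
  unfold Spec_stat_scaffold
  obtain ⟨m, hm⟩ : ∃ m, PySem.List.max? scaflens (fun v => v) = some m := by
    cases h : PySem.List.max? scaflens (fun v => v) with
    | none => exact absurd ((PySem.List.max?_eq_none_iff scaflens (fun v => v)).mp h) hne
    | some m => exact ⟨m, rfl⟩
  obtain ⟨i5, i6, i7, i8, i9⟩ :=
    pvNxLoop_eval (PySem.List.sorted scaflens (fun v => v) true) scaflens.sum 0
      (0, false) (0, false) (0, false) (0, false) (0, false)
      (fun _ => rfl) (fun _ => rfl) (fun _ => rfl) (fun _ => rfl) (fun _ => rfl)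
  simp only [stat_scaffold, stat_scaffold_alt, hm, pvOut]
  rw [foldA_n50, foldA_n60, foldA_n70, foldA_n80, foldA_n90, foldA_lng, foldA_tot,
     foldA_k1, foldA_k2, foldA_k5]
  simp only [i5, i6, i7, i8, i9, if_false, Bool.false_eq_true]
  simp [pvNxRow, pvSizeRow, pvLastGL, pvLastS, get_nx]
  and_intros <;> rfl
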